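-- pv_equiv track=rewrite | github.com/qqaazz0222/CodingTest | 프로그래머스/소수 만들기.py | solution
-- ===== SOURCE A (Python) =====
-- def check(n):
--     for i in range(2, n):
--         if n%i == 0:
--             return False
--     return True
--
-- def solution(nums):
--     answer = 0
--     temp = []
--     for i in range(len(nums)-2):
--         for j in range(i+1,len(nums)-1):
--             for l in range(j+1, len(nums)):
--                 n = nums[i] + nums[j] + nums[l]
--                 if n not in temp:
--                     if check(n):
--                         temp.append(n)
--     answer = len(temp)
--     return answer
-- ===== SOURCE B (Python) =====
-- def _has_no_small_divisor(n):
--     i = 2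
--     while i * i <= n:
--         if n % i == 0:
--             return False
--         i += 1
--     return True
--
-- def _ksubset_sums(lst, k):
--     # set of sums of all k-element subsets of lst (by positions), by choose/skip recursion
--     if k == 0:
--         return {0}
--     if len(lst) < k:
--         return set()
--     head, rest = lst[0], lst[1:]
--     return {head + s for s in _ksubset_sums(rest, k - 1)} | _ksubset_sums(rest, k)
--
-- def solution(nums):
--     sums = _ksubset_sums(list(nums), 3)
--     return sum(1 for s in sums if _has_no_small_divisor(s))
-- ===== Notes on version B (the rewrite author's own statement) =====
-- stated objective: alternative
-- what changed: Replaces the index-triple loops with a dedup-by-list-membership interleaved primality check by a choose/skip recursion building the set of all 3-subset sums, followed by a separate counting pass using a sqrt-bounded trial-division test instead of A's divisor scan up to n-1.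
import Mathlib
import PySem

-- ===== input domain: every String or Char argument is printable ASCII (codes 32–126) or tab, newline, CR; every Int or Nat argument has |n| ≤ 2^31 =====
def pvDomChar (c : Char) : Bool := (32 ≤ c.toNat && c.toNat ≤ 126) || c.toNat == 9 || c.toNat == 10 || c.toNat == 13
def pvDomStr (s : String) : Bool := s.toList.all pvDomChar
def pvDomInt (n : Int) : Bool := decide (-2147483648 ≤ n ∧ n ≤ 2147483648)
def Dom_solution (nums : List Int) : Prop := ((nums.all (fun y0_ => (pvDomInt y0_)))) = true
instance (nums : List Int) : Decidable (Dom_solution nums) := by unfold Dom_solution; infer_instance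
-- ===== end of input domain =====

-- B replaces A's index-triple loops (which dedup via list membership and interleave a
-- divisor scan up to n-1) by a choose/skip recursion building the set of 3-subset sums,
-- then a separate counting pass with an i*i<=n-bounded trial-division test (alternative algorithm).

-- ===== PORT A =====
-- 'for i in range(2, n)' ported as a lazy counting loop (Python's range is lazy);
-- early 'return False' = stopping the recursion
def checkAux (n i : Int) : Bool :=
  if i < n then
    if PySem.Int.mod n i == 0 then false else checkAux n (i + 1)
  else true
termination_by (n - i).toNat

def check (n : Int) : Bool := checkAux n 2

def solution (nums : List Int) : Int :=
  let N : Int := (nums.length : Int)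
  let temp : List Int :=
    (PySem.List.pyRange 0 (N - 2) 1).foldl (fun temp i =>
      (PySem.List.pyRange (i + 1) (N - 1) 1).foldl (fun temp j =>
        (PySem.List.pyRange (j + 1) N 1).foldl (fun temp l =>
          let n := PySem.List.pyGetD nums i 0 + PySem.List.pyGetD nums j 0 +
                   PySem.List.pyGetD nums l 0
          if n ∈ temp then temp
          else if check n then temp ++ [n] else temp) temp) temp) []
  (temp.length : Int)

-- ===== PORT B =====
-- needed by hnsdAux's termination proof
theorem le_mul_self_int (i : Int) : i ≤ i * i := by
  by_cases h : i ≤ 0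
  · exact h.trans (mul_self_nonneg i)
  · nlinarith

-- the while-loop of _has_no_small_divisor, i the loop counter
def hnsdAux (n i : Int) : Bool :=
  if i * i ≤ n then
    if PySem.Int.mod n i == 0 then false else hnsdAux n (i + 1)
  else true
termination_by (n + 2 - i).toNat
decreasing_by
  have := le_mul_self_int i
  omega

def hasNoSmallDivisor (n : Int) : Bool := hnsdAux n 2

-- choose/skip recursion: set of sums of all k-element subsets of lst
def tripleSums (lst : List Int) (k : Nat) : PySem.Set Int :=
  if k = 0 then PySem.Set.ofList [0]
  else if lst.length < k then PySem.Set.empty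
  else match lst with
    | [] => PySem.Set.empty
    | head :: rest =>
        PySem.Set.union
          (PySem.Set.ofList ((tripleSums rest (k - 1)).map (fun s => head + s)))
          (tripleSums rest k)
termination_by lst.length
decreasing_by all_goals simp

def solution_alt (nums : List Int) : Int :=
  let sums := tripleSums nums 3
  sums.foldl (fun acc s => if hasNoSmallDivisor s then acc + 1 else acc) 0

-- ===== PRECONDITION & SPEC =====
def Spec_solution (nums : List Int) (out : Int) : Prop := out = solution_alt nums
instance (nums : List Int) (out : Int) : Decidable (Spec_solution nums out) := by unfold Spec_solution; infer_instance

-- ===== CLAIM (what is proved, stated in full; the proofs are below) =====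
def Claim_equal_solution : Prop := ∀ (nums : List Int), Dom_solution nums → Spec_solution nums (solution nums)

-- ===== LEMMAS AND PROOFS =====

-- ---- the two primality tests agree ----

theorem checkAux_iff (n i : Int) :
    checkAux n i = true ↔ ∀ j : Int, i ≤ j → j < n → ¬ (j ∣ n) := by
  fun_induction checkAux n i with
  | case1 i h hm =>
    simp only [Bool.false_eq_true, false_iff]
    intro H
    refine H i (le_refl i) h ?_
    rw [beq_iff_eq, PySem.Int.mod_eq_zero_iff_dvd] at hm
    exact hm
  | case2 i h hm ih =>
    rw [ih]
    rw [beq_iff_eq, PySem.Int.mod_eq_zero_iff_dvd] at hm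
    constructor
    · intro H j hj hjn hd
      rcases eq_or_lt_of_le hj with rfl | hlt
      · exact hm hd
      · exact H j (by omega) hjn hd
    · intro H j hj hjn hd
      exact H j (by omega) hjn hd
  | case3 i h =>
    simp only [true_iff]
    intro j hj hjn hd
    omega

theorem check_iff (n : Int) :
    check n = true ↔ ∀ i : Int, 2 ≤ i → i < n → ¬ (i ∣ n) := by
  unfold check
  exact checkAux_iff n 2

theorem hnsdAux_iff (n i : Int) (hi : 2 ≤ i) :
    hnsdAux n i = true ↔ ∀ j : Int, i ≤ j → j * j ≤ n → ¬ (j ∣ n) := by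
  fun_induction hnsdAux n i with
  | case1 i h hm =>
    simp only [Bool.false_eq_true, false_iff]
    intro H
    refine H i (le_refl i) h ?_
    rw [beq_iff_eq, PySem.Int.mod_eq_zero_iff_dvd] at hm
    exact hm
  | case2 i h hm ih =>
    rw [ih (by omega)]
    rw [beq_iff_eq, PySem.Int.mod_eq_zero_iff_dvd] at hm
    constructor
    · intro H j hj hjj hd
      rcases eq_or_lt_of_le hj with rfl | hlt
      · exact hm hd
      · exact H j (by omega) hjj hd
    · intro H j hj hjj hd
      exact H j (by omega) hjj hd
  | case3 i h =>
    simp only [true_iff]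
    intro j hj hjj hd
    nlinarith

theorem sqrt_bound_of_range_bound (n : Int)
    (H : ∀ j : Int, 2 ≤ j → j * j ≤ n → ¬ (j ∣ n)) :
    ∀ i : Int, 2 ≤ i → i < n → ¬ (i ∣ n) := by
  intro i h2 hn hd
  obtain ⟨m, hm⟩ := hd
  have hn0 : 0 < n := by omega
  have hm1 : 1 ≤ m := by nlinarith
  have hm2 : 2 ≤ m := by
    rcases eq_or_lt_of_le hm1 with rfl | h
    · omega
    · omega
  by_cases hii : i * i ≤ n
  · exact H i h2 hii ⟨m, hm⟩
  · have him : m < i := by nlinarith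
    have : m * m ≤ n := by nlinarith
    exact H m hm2 this ⟨i, by linarith [hm]⟩

theorem range_bound_of_sqrt_bound (n : Int)
    (H : ∀ i : Int, 2 ≤ i → i < n → ¬ (i ∣ n)) :
    ∀ j : Int, 2 ≤ j → j * j ≤ n → ¬ (j ∣ n) := by
  intro j h2 hjj hd
  have : j < n := by nlinarith
  exact H j h2 this hd

theorem hasNoSmallDivisor_eq_check (n : Int) : hasNoSmallDivisor n = check n := by
  rw [Bool.eq_iff_iff, hasNoSmallDivisor, hnsdAux_iff n 2 (le_refl 2), check_iff]
  exact ⟨sqrt_bound_of_range_bound n, range_bound_of_sqrt_bound n⟩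

-- ---- B side: membership of tripleSums ----

theorem tripleSums_zero (lst : List Int) : tripleSums lst 0 = [0] := by
  rw [tripleSums.eq_def]; rfl

theorem mem_tripleSums_one (lst : List Int) (x : Int) :
    x ∈ tripleSums lst 1 ↔ ∃ i, i < lst.length ∧ x = lst.getD i 0 := by
  induction lst with
  | nil => rw [tripleSums]; simp [PySem.Set.empty]
  | cons a rest ih =>
    rw [tripleSums]
    simp only [PySem.Set.mem_union, PySem.Set.mem_ofList, List.mem_map,
      if_neg (by omega : ¬ (1 = 0)), if_neg (by simp : ¬ (a :: rest).length < 1)]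
    constructor
    · rintro (⟨s, hs, rfl⟩ | h)
      · rw [tripleSums_zero] at hs; simp at hs; exact ⟨0, by simp, by simp [hs]⟩
      · obtain ⟨i, hi, rfl⟩ := ih.mp h
        exact ⟨i + 1, by simp; omega, by simp⟩
    · rintro ⟨i, hi, rfl⟩
      match i with
      | 0 => exact Or.inl ⟨0, by rw [tripleSums_zero]; simp, by simp⟩
      | i + 1 =>
        right
        exact ih.mpr ⟨i, by simp at hi; omega, by simp⟩

theorem mem_tripleSums_two (lst : List Int) (x : Int) :
    x ∈ tripleSums lst 2 ↔ ∃ i j, i < j ∧ j < lst.length ∧ x = lst.getD i 0 + lst.getD j 0 := by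
  induction lst with
  | nil => rw [tripleSums]; simp [PySem.Set.empty]
  | cons a rest ih =>
    rw [tripleSums]
    by_cases hl : (a :: rest).length < 2
    · rw [if_neg (by omega), if_pos hl]
      simp only [PySem.Set.empty, List.not_mem_nil, false_iff]
      rintro ⟨i, j, hij, hj, _⟩
      simp only [List.length_cons] at hl hj; omega
    · rw [if_neg (by omega), if_neg hl]
      simp only [PySem.Set.mem_union, PySem.Set.mem_ofList, List.mem_map]
      constructor
      · rintro (⟨s, hs, rfl⟩ | h)
        · obtain ⟨i, hi, rfl⟩ := (mem_tripleSums_one rest s).mp hs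
          exact ⟨0, i + 1, by omega, by simp; omega, by simp⟩
        · obtain ⟨i, j, hij, hj, rfl⟩ := ih.mp h
          exact ⟨i + 1, j + 1, by omega, by simp; omega, by simp⟩
      · rintro ⟨i, j, hij, hj, rfl⟩
        match i, j with
        | 0, j + 1 =>
          exact Or.inl ⟨rest.getD j 0, (mem_tripleSums_one rest _).mpr
            ⟨j, by simp at hj; omega, rfl⟩, by simp⟩
        | i + 1, j + 1 =>
          exact Or.inr (ih.mpr ⟨i, j, by omega, by simp at hj; omega, by simp⟩)

theorem mem_tripleSums_three (lst : List Int) (x : Int) :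
    x ∈ tripleSums lst 3 ↔ ∃ i j l, i < j ∧ j < l ∧ l < lst.length ∧
      x = lst.getD i 0 + lst.getD j 0 + lst.getD l 0 := by
  induction lst with
  | nil => rw [tripleSums]; simp [PySem.Set.empty]
  | cons a rest ih =>
    rw [tripleSums]
    by_cases hl : (a :: rest).length < 3
    · rw [if_neg (by omega), if_pos hl]
      simp only [PySem.Set.empty, List.not_mem_nil, false_iff]
      rintro ⟨i, j, l, hij, hjl, hl', _⟩
      simp only [List.length_cons] at hl hl'; omega
    · rw [if_neg (by omega), if_neg hl]
      simp only [PySem.Set.mem_union, PySem.Set.mem_ofList, List.mem_map]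
      constructor
      · rintro (⟨s, hs, rfl⟩ | h)
        · obtain ⟨i, j, hij, hj, rfl⟩ := (mem_tripleSums_two rest s).mp hs
          exact ⟨0, i + 1, j + 1, by omega, by omega, by simp; omega, by simp; ring⟩
        · obtain ⟨i, j, l, hij, hjl, hl', rfl⟩ := ih.mp h
          exact ⟨i + 1, j + 1, l + 1, by omega, by omega, by simp; omega, by simp⟩
      · rintro ⟨i, j, l, hij, hjl, hl', rfl⟩
        match i, j, l with
        | 0, j + 1, l + 1 =>
          exact Or.inl ⟨rest.getD j 0 + rest.getD l 0, (mem_tripleSums_two rest _).mpr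
            ⟨j, l, by omega, by simp at hl'; omega, rfl⟩, by simp; ring⟩
        | i + 1, j + 1, l + 1 =>
          exact Or.inr (ih.mpr ⟨i, j, l, by omega, by omega, by simp at hl'; omega, by simp⟩)

theorem nodup_tripleSums (lst : List Int) (k : Nat) : (tripleSums lst k).Nodup := by
  fun_induction tripleSums lst k with
  | case1 => simp
  | case2 => simp [PySem.Set.empty]
  | case3 => simp [PySem.Set.empty]
  | case4 =>
    apply PySem.Set.nodup_union
    exact PySem.Set.nodup_ofList _

-- ---- A side: the nested loops as a fold over the flat list of triple sums ----

-- the loop body of A, applied to an already-computed sum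
def stepA (temp : List Int) (s : Int) : List Int :=
  if s ∈ temp then temp else if check s then temp ++ [s] else temp

-- the flat list of triple sums in A's traversal order
def flatTriples (nums : List Int) : List Int :=
  (PySem.List.pyRange 0 ((nums.length : Int) - 2) 1).flatMap (fun i =>
    (PySem.List.pyRange (i + 1) ((nums.length : Int) - 1) 1).flatMap (fun j =>
      (PySem.List.pyRange (j + 1) (nums.length : Int) 1).map (fun l =>
        PySem.List.pyGetD nums i 0 + PySem.List.pyGetD nums j 0 + PySem.List.pyGetD nums l 0)))

theorem foldl_flatMap {α β : Type} (L : List α) (g : α → List β) (f : List Int → β → List Int)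
    (init : List Int) :
    (L.flatMap g).foldl f init = L.foldl (fun acc a => (g a).foldl f acc) init := by
  induction L generalizing init with
  | nil => rfl
  | cons a L ih => simp [List.foldl_append, ih]

theorem solution_eq_flat (nums : List Int) :
    solution nums = (((flatTriples nums).foldl stepA []).length : Int) := by
  simp only [solution, flatTriples]
  rw [foldl_flatMap]
  congr 2
  apply PySem.List.foldl_congr_mem
  intro acc i _
  rw [foldl_flatMap]
  apply PySem.List.foldl_congr_mem
  intro acc j _
  rw [List.foldl_map]
  apply PySem.List.foldl_congr_mem
  intro acc l _
  simp [stepA]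

theorem mem_foldl_stepA (T : List Int) (temp : List Int) (x : Int) :
    x ∈ T.foldl stepA temp ↔ x ∈ temp ∨ (x ∈ T ∧ check x = true) := by
  induction T generalizing temp with
  | nil => simp
  | cons a T ih =>
    rw [List.foldl_cons, ih]
    unfold stepA
    by_cases ha : a ∈ temp
    · rw [if_pos ha]
      constructor
      · rintro (h | ⟨h, hc⟩)
        · exact Or.inl h
        · exact Or.inr ⟨by simp [h], hc⟩
      · rintro (h | ⟨h, hc⟩)
        · exact Or.inl h
        · rcases List.mem_cons.mp h with rfl | h'
          · exact Or.inl ha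
          · exact Or.inr ⟨h', hc⟩
    · rw [if_neg ha]
      by_cases hc : check a = true
      · rw [if_pos hc]
        simp only [List.mem_append, List.mem_cons, List.not_mem_nil, or_false]
        constructor
        · rintro ((h | rfl) | ⟨h, hx⟩)
          · exact Or.inl h
          · exact Or.inr ⟨Or.inl rfl, hc⟩
          · exact Or.inr ⟨Or.inr h, hx⟩
        · rintro (h | ⟨(rfl | h), hx⟩)
          · exact Or.inl (Or.inl h)
          · exact Or.inl (Or.inr rfl)
          · exact Or.inr ⟨h, hx⟩
      · rw [if_neg hc]
        simp only [List.mem_cons]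
        constructor
        · rintro (h | ⟨h, hx⟩)
          · exact Or.inl h
          · exact Or.inr ⟨Or.inr h, hx⟩
        · rintro (h | ⟨(rfl | h), hx⟩)
          · exact Or.inl h
          · exact absurd hx hc
          · exact Or.inr ⟨h, hx⟩

theorem nodup_foldl_stepA (T : List Int) (temp : List Int) (h : temp.Nodup) :
    (T.foldl stepA temp).Nodup := by
  induction T generalizing temp with
  | nil => exact h
  | cons a T ih =>
    rw [List.foldl_cons]
    apply ih
    unfold stepA
    by_cases ha : a ∈ temp
    · rw [if_pos ha]; exact h
    · rw [if_neg ha]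
      by_cases hc : check a = true
      · rw [if_pos hc]
        simp only [List.nodup_append, List.nodup_singleton, true_and]
        refine ⟨h, fun b hb c hc => ?_⟩
        simp only [List.mem_cons, List.not_mem_nil, or_false] at hc
        subst hc
        intro hba
        exact ha (hba ▸ hb)
      · rw [if_neg hc]; exact h

theorem mem_flatTriples (nums : List Int) (x : Int) :
    x ∈ flatTriples nums ↔ ∃ i j l, i < j ∧ j < l ∧ l < nums.length ∧
      x = nums.getD i 0 + nums.getD j 0 + nums.getD l 0 := by
  unfold flatTriples
  simp only [List.mem_flatMap, List.mem_map, PySem.List.mem_pyRange_one]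
  constructor
  · rintro ⟨i, ⟨hi0, hi⟩, j, ⟨hji, hj⟩, l, ⟨hlj, hl⟩, rfl⟩
    have h0j : 0 ≤ j := by omega
    have h0l : 0 ≤ l := by omega
    refine ⟨i.toNat, j.toNat, l.toNat, by omega, by omega, by omega, ?_⟩
    rw [← PySem.List.pyGetD_natCast nums i.toNat 0, ← PySem.List.pyGetD_natCast nums j.toNat 0,
      ← PySem.List.pyGetD_natCast nums l.toNat 0]
    rw [Int.toNat_of_nonneg hi0, Int.toNat_of_nonneg h0j, Int.toNat_of_nonneg h0l]
  · rintro ⟨i, j, l, hij, hjl, hl, rfl⟩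
    refine ⟨(i : Int), ⟨by omega, by omega⟩, (j : Int), ⟨by omega, by omega⟩,
      (l : Int), ⟨by omega, by omega⟩, ?_⟩
    rw [PySem.List.pyGetD_natCast, PySem.List.pyGetD_natCast, PySem.List.pyGetD_natCast]

-- ---- assembly ----

theorem solution_alt_eq_filter (nums : List Int) :
    solution_alt nums = (((tripleSums nums 3).filter check).length : Int) := by
  unfold solution_alt
  rw [PySem.List.foldl_if_add_one]
  have : (tripleSums nums 3).countP hasNoSmallDivisor = (tripleSums nums 3).countP check := by
    apply List.countP_congr
    intro x _
    rw [hasNoSmallDivisor_eq_check]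
  rw [this, List.countP_eq_length_filter]
  simp

-- ===== VERDICT (by name: the statement is the Claim_ definition above) =====
theorem solution_spec : Claim_equal_solution := by
  unfold Claim_equal_solution Spec_solution
  intro nums _
  rw [solution_eq_flat, solution_alt_eq_filter]
  congr 1
  apply List.Perm.length_eq
  rw [List.perm_ext_iff_of_nodup (nodup_foldl_stepA _ _ List.nodup_nil)
    (List.Nodup.filter _ (nodup_tripleSums nums 3))]
  intro x
  rw [mem_foldl_stepA, List.mem_filter, mem_tripleSums_three, mem_flatTriples]
  simp
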